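-- pv_equiv track=rewrite | github.com/jdanray/leetcode | minOperations14.py | minOperations
-- ===== SOURCE A (Python) =====
-- def minOperations(nums):
-- 	flipped = False
-- 	res = 0
-- 	for n in nums:
-- 		if (n == 0 and not flipped) or (n == 1 and flipped):
-- 			flipped = not flipped
-- 			res += 1
-- 	return res
-- ===== SOURCE B (Python) =====
-- def minOperations(nums):
--     b = [n for n in nums if n == 0 or n == 1]
--     if not b:
--         return 0
--     runs = 1 + sum(1 for x, y in zip(b, b[1:]) if x != y)
--     return runs if b[0] == 0 else runs - 1
-- ===== Notes on version B (the rewrite author's own statement) =====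
-- stated objective: alternative
-- what changed: Replaces A's stateful flip-toggle loop with a two-phase computation: filter to the binary (0/1) elements, count adjacent unequal pairs with zip, and return a closed form adjusted by whether the first binary element is 0.
import Mathlib
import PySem

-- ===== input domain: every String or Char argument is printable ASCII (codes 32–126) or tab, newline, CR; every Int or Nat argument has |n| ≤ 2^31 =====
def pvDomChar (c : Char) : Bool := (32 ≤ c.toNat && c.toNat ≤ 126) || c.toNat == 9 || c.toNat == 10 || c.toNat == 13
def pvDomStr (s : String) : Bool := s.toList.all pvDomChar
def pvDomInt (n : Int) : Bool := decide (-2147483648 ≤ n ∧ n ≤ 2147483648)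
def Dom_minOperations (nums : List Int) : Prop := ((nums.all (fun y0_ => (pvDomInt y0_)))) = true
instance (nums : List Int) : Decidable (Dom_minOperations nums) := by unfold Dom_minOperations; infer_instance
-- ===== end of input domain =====

-- ===== PORT A =====
-- B differs from A by a two-phase decomposition (filter + adjacent-pair count + closed form) instead of a stateful toggle loop; return values only (no mutation in either).
-- the for-loop of A, threading (flipped, res) through the list
def minOperations.loop (flipped : Bool) (res : Int) : List Int → Int
  | [] => res
  | n :: t =>
    if (n = 0 ∧ flipped = false) ∨ (n = 1 ∧ flipped = true) then
      minOperations.loop (!flipped) (res + 1) t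
    else
      minOperations.loop flipped res t

def minOperations (nums : List Int) : Int :=
  minOperations.loop false 0 nums

-- ===== PORT B =====
def minOperations_alt (nums : List Int) : Int :=
  let b := nums.filter (fun n => n == 0 || n == 1)
  match b with
  | [] => 0
  | x :: t =>
    let runs : Int := 1 + (((x :: t).zip ((x :: t).tail)).filter (fun p => p.1 != p.2)).length
    if x = 0 then runs else runs - 1

-- ===== PRECONDITION & SPEC =====
def Spec_minOperations (nums : List Int) (out : Int) : Prop := out = minOperations_alt nums
instance (nums : List Int) (out : Int) : Decidable (Spec_minOperations nums out) := by unfold Spec_minOperations; infer_instance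

-- ===== CLAIM (what is proved, stated in full; the proofs are below) =====
def Claim_equal_minOperations : Prop := ∀ (nums : List Int), Dom_minOperations nums → Spec_minOperations nums (minOperations nums)

-- ===== LEMMAS AND PROOFS =====

-- flip count over a binary list with a virtual previous element
def gFlips (prev : Int) : List Int → Int
  | [] => 0
  | n :: t => (if n ≠ prev then 1 else 0) + gFlips n t

lemma loop_skip_nonbinary (nums : List Int) : ∀ (flipped : Bool) (res : Int),
    minOperations.loop flipped res nums =
      minOperations.loop flipped res (nums.filter (fun n => n == 0 || n == 1)) := by
  induction nums with
  | nil => intro flipped res; rfl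
  | cons n t ih =>
    intro flipped res
    by_cases hb : n = 0 ∨ n = 1
    · have hf : List.filter (fun n : Int => n == 0 || n == 1) (n :: t) =
          n :: List.filter (fun n : Int => n == 0 || n == 1) t := by
        rcases hb with h | h <;> simp [h]
      rw [hf]
      simp only [minOperations.loop]
      split <;> exact ih _ _
    · have h0 : n ≠ 0 := fun h => hb (Or.inl h)
      have h1 : n ≠ 1 := fun h => hb (Or.inr h)
      have hf : List.filter (fun n : Int => n == 0 || n == 1) (n :: t) =
          List.filter (fun n : Int => n == 0 || n == 1) t := by
        simp [h0, h1]
      rw [hf]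
      simp only [minOperations.loop]
      rw [if_neg]
      · exact ih _ _
      · rintro (⟨h, _⟩ | ⟨h, _⟩)
        · exact h0 h
        · exact h1 h

lemma loop_eq_gFlips (b : List Int) : ∀ (flipped : Bool) (res : Int),
    (∀ n ∈ b, n = 0 ∨ n = 1) →
    minOperations.loop flipped res b = res + gFlips (if flipped then 0 else 1) b := by
  induction b with
  | nil => intro flipped res _; simp [minOperations.loop, gFlips]
  | cons n t ih =>
    intro flipped res hbin
    have hn : n = 0 ∨ n = 1 := hbin n (by simp)
    have ht : ∀ m ∈ t, m = 0 ∨ m = 1 := fun m hm => hbin m (by simp [hm])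
    simp only [minOperations.loop, gFlips]
    rcases hn with h | h <;> subst h <;> cases flipped
    · -- n = 0, flipped = false: condition fires
      rw [if_pos (Or.inl ⟨rfl, rfl⟩), ih _ _ ht]
      simp; ring
    · -- n = 0, flipped = true: no-op
      rw [if_neg (by rintro (⟨_, h⟩ | ⟨h, _⟩) <;> simp_all), ih _ _ ht]
      simp
    · -- n = 1, flipped = false: no-op
      rw [if_neg (by rintro (⟨h, _⟩ | ⟨_, h⟩) <;> simp_all), ih _ _ ht]
      simp
    · -- n = 1, flipped = true: condition fires
      rw [if_pos (Or.inr ⟨rfl, rfl⟩), ih _ _ ht]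
      simp; ring

lemma gFlips_eq_adj (t : List Int) : ∀ (n : Int),
    gFlips n t = ((((n :: t).zip t).filter (fun p => p.1 != p.2)).length : Int) := by
  induction t with
  | nil => intro n; simp [gFlips]
  | cons y t ih =>
    intro n
    simp only [gFlips, List.zip_cons_cons, List.filter]
    by_cases h : n = y
    · subst h
      simp only [bne_self_eq_false]
      rw [if_neg (by intro hc; exact hc rfl), ih n]
      ring
    · have hbne : (n != y) = true := by simp [bne, h]
      rw [if_pos (fun hc => h hc.symm), hbne, ih y]
      simp
      omega

-- ===== VERDICT (by name: the statement is the Claim_ definition above) =====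
theorem minOperations_spec : Claim_equal_minOperations := by
  intro nums _
  unfold Spec_minOperations minOperations minOperations_alt
  rw [loop_skip_nonbinary]
  have hbin : ∀ n ∈ nums.filter (fun n => n == 0 || n == 1), n = 0 ∨ n = 1 := by
    intro n hn
    rw [List.mem_filter] at hn
    have := hn.2
    simp at this
    tauto
  generalize hb : nums.filter (fun n => n == 0 || n == 1) = b at hbin ⊢
  rw [loop_eq_gFlips b false 0 hbin]
  cases b with
  | nil => simp [gFlips]
  | cons x t =>
    have hx : x = 0 ∨ x = 1 := hbin x (List.mem_cons_self ..)
    simp only [gFlips, List.tail_cons]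
    rw [gFlips_eq_adj t x]
    rcases hx with h | h <;> subst h <;> split_ifs <;> simp_all
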